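-- pv_equiv track=rewrite | github.com/sparrowV/python_tutorials | main.py | analyzeCounts
-- ===== SOURCE A (Python) =====
-- def analyzeCounts(d):
--     result = {}
--     total = 0
--     for key1 in d:
--         for elem in d[key1]:
--             if(elem in result):
--                 result[elem]+=d[key1][elem]
--             else:
--                 result[elem]=d[key1][elem]
--             total+=d[key1][elem]
--
--     return result,total
-- ===== SOURCE B (Python) =====
-- def analyzeCounts(d):
--     # Key-first strategy: collect distinct inner keys in first-occurrence order,
--     # then compute each key's aggregate by a fresh scan over all inner dicts;
--     # the total is derived from the aggregated result afterwards.
--     keys = []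
--     for inner in d.values():
--         for k in inner:
--             if k not in keys:
--                 keys.append(k)
--     result = {k: sum(inner.get(k, 0) for inner in d.values()) for k in keys}
--     return result, sum(result.values())
-- ===== Notes on version B (the rewrite author's own statement) =====
-- stated objective: alternative
-- what changed: B inverts the traversal: it first collects the distinct inner keys in first-occurrence order, then computes each key's aggregate by a fresh scan over all inner dicts (inner.get(k, 0)) instead of A's single pass that co-accumulates every bucket and the total in one nested loop; the total is derived from the finished result afterwards. Pre_ only excludes assoc-list encodings with duplicate (outer or inner) keys, which correspond to no Python dict input.
import Mathlib
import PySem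

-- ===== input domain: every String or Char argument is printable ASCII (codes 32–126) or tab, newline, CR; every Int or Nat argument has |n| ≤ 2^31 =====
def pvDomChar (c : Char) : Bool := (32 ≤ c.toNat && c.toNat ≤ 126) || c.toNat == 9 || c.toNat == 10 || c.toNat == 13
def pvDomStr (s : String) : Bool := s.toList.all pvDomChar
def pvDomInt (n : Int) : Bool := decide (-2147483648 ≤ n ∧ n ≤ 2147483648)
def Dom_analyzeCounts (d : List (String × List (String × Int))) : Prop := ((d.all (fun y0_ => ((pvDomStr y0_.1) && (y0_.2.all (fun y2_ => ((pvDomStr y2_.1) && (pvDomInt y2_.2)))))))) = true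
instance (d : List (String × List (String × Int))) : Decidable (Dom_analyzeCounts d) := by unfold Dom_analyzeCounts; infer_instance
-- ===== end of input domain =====

-- B inverts the traversal: it collects the distinct inner keys first, then computes each key's
-- aggregate by a fresh scan over all inner dicts and derives the total from the finished result;
-- objective: alternative (same result by a key-first algorithm, not claimed faster).


-- ===== PORT A =====
-- d[key1]: first-match lookup of an outer key (Python dict indexing; default [] unreachable under Pre_)
def lookupOuterA : List (String × List (String × Int)) → String → List (String × Int)
  | [], _ => []
  | (a, b) :: t, k => if a == k then b else lookupOuterA t k

-- d[key1][elem]: first-match lookup of an inner key (default 0 unreachable under Pre_)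
def lookupInnerA : List (String × Int) → String → Int
  | [], _ => 0
  | (a, b) :: t, k => if a == k then b else lookupInnerA t k

def analyzeCounts (d : List (String × List (String × Int))) : (List (String × Int)) × Int :=
  let st := d.foldl (fun (st : PySem.Dict String Int × Int) p =>
    (lookupOuterA d p.1).foldl (fun st q =>
      let v := lookupInnerA (lookupOuterA d p.1) q.1
      ((if st.1.contains q.1 then st.1.insert q.1 (st.1.getD q.1 0 + v)
        else st.1.insert q.1 v), st.2 + v)) st)
    ((PySem.Dict.empty : PySem.Dict String Int), (0 : Int))
  (st.1.items, st.2)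

-- ===== PORT B =====
-- keys: distinct inner keys in first-occurrence order ('if k not in keys: keys.append(k)')
def collectKeysB (d : List (String × List (String × Int))) : List String :=
  d.foldl (fun ks p => p.2.foldl (fun ks q => if q.1 ∈ ks then ks else ks ++ [q.1]) ks) []

-- inner.get(k, 0): first-match lookup with default 0
def getB : List (String × Int) → String → Int
  | [], _ => 0
  | (a, b) :: t, k => if a == k then b else getB t k

def analyzeCounts_alt (d : List (String × List (String × Int))) : (List (String × Int)) × Int :=
  let keys := collectKeysB d
  let result := keys.map (fun k => (k, (d.map (fun p => getB p.2 k)).sum))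
  (result, (result.map Prod.snd).sum)

-- ===== PRECONDITION & SPEC =====
-- Pre_ excludes only association-list encodings with a duplicated outer key or a duplicated key
-- inside an inner list: a Python dict cannot hold duplicate keys, so those lists encode no Python
-- input at all (every actual dict input satisfies Pre_).
def Pre_analyzeCounts (d : List (String × List (String × Int))) : Prop :=
  (d.map Prod.fst).Nodup ∧ ∀ p ∈ d, (p.2.map Prod.fst).Nodup
instance (d : List (String × List (String × Int))) : Decidable (Pre_analyzeCounts d) := by unfold Pre_analyzeCounts; infer_instance

def pvWitness_analyzeCounts : (List (String × List (String × Int))) :=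
  [("a", [("x", 1), ("y", 2)]), ("b", [("x", 3)])]

def Spec_analyzeCounts (d : List (String × List (String × Int))) (out : (List (String × Int)) × Int) : Prop := out = analyzeCounts_alt d
instance (d : List (String × List (String × Int))) (out : (List (String × Int)) × Int) : Decidable (Spec_analyzeCounts d out) := by unfold Spec_analyzeCounts; infer_instance

-- ===== CLAIM (what is proved, stated in full; the proofs are below) =====
def Claim_equal_analyzeCounts : Prop := ∀ (d : List (String × List (String × Int))), Dom_analyzeCounts d → Pre_analyzeCounts d → Spec_analyzeCounts d (analyzeCounts d)

-- ===== LEMMAS AND PROOFS =====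

-- The dict A's (rewritten) loop builds over the flattened pair list.
def dictOf (ps : List (String × Int)) : PySem.Dict String Int :=
  ps.foldl (fun r q => r.insert q.1 (r.getD q.1 0 + q.2)) PySem.Dict.empty

-- Distinct keys of a pair list in first-occurrence order, from an arbitrary start.
def fkStep (ks : List String) (q : String × Int) : List String :=
  if q.1 ∈ ks then ks else ks ++ [q.1]

def firstKeys (ps : List (String × Int)) : List String := ps.foldl fkStep []

-- Sum of the values carried by key k in a pair list.
def sumFor (k : String) (ps : List (String × Int)) : Int :=
  ((ps.filter (fun q => q.1 == k)).map Prod.snd).sum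

theorem mem_fkFold {ps : List (String × Int)} {ks : List String} {x : String} :
    x ∈ ps.foldl fkStep ks ↔ x ∈ ks ∨ x ∈ ps.map Prod.fst := by
  induction ps generalizing ks with
  | nil => simp
  | cons q t ih =>
    simp only [List.foldl_cons, List.map_cons, List.mem_cons, ih, fkStep]
    split_ifs with h
    · constructor
      · rintro (h1 | h2)
        · exact Or.inl h1
        · exact Or.inr (Or.inr h2)
      · rintro (h1 | rfl | h2)
        · exact Or.inl h1
        · exact Or.inl h
        · exact Or.inr h2
    · simp only [List.mem_append, List.mem_singleton]
      tauto

theorem nodup_fkFold {ps : List (String × Int)} {ks : List String} (h : ks.Nodup) :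
    (ps.foldl fkStep ks).Nodup := by
  induction ps generalizing ks with
  | nil => exact h
  | cons q t ih =>
    simp only [List.foldl_cons, fkStep]
    split_ifs with hm
    · exact ih h
    · apply ih
      simp only [List.nodup_append, List.nodup_singleton, true_and]
      exact ⟨h, fun a ha => by simp; rintro rfl; exact hm ha⟩

theorem sumFor_append (k : String) (ps : List (String × Int)) (q : String × Int) :
    sumFor k (ps ++ [q]) = sumFor k ps + (if q.1 = k then q.2 else 0) := by
  simp only [sumFor, List.filter_append]
  by_cases h : q.1 = k <;> simp [h]

theorem filter_eq_nil_of_not_mem {ps : List (String × Int)} {k : String}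
    (h : k ∉ ps.map Prod.fst) : ps.filter (fun q => q.1 == k) = [] := by
  induction ps with
  | nil => rfl
  | cons q t ih =>
    have : k ≠ q.1 ∧ k ∉ t.map Prod.fst := by simpa using h
    simp [Ne.symm this.1, ih this.2]

-- Main invariant: the dict built from ps lists each first-occurrence key with its total.
theorem dictOf_items (ps : List (String × Int)) :
    (dictOf ps).items = (firstKeys ps).map (fun k => (k, sumFor k ps)) := by
  induction ps using List.reverseRecOn with
  | nil => simp [dictOf, firstKeys, sumFor, PySem.Dict.empty]
  | append_singleton t q ih =>
    have hkeys : (dictOf t).keys = firstKeys t := by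
      simp [PySem.Dict.keys, ih, List.map_map, Function.comp_def]
    have hnd : (dictOf t).keys.Nodup := by
      rw [hkeys]; exact nodup_fkFold List.nodup_nil
    have hfold : dictOf (t ++ [q]) = (dictOf t).insert q.1 ((dictOf t).getD q.1 0 + q.2) := by
      simp [dictOf, List.foldl_append]
    have hfk : firstKeys (t ++ [q]) = fkStep (firstKeys t) q := by
      simp [firstKeys, List.foldl_append]
    by_cases hc : (dictOf t).contains q.1
    · -- key already present: in-place update, key order unchanged
      have hmemk : q.1 ∈ firstKeys t := by
        rw [← hkeys]; exact (PySem.Dict.contains_iff_mem_keys _ _).mp hc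
      have hget : (dictOf t).getD q.1 0 = sumFor q.1 t := by
        apply PySem.Dict.getD_of_mem_items _ _ hnd
        rw [ih]; exact List.mem_map_of_mem hmemk
      rw [hfold, PySem.Dict.items_insert_of_contains _ _ hc, ih, hfk,
        fkStep, if_pos hmemk, List.map_map]
      apply List.map_congr_left
      intro k _
      by_cases hk : k = q.1
      · subst hk
        simp [Function.comp, sumFor_append, hget]
      · simp [Function.comp, Ne.symm hk, sumFor_append,
          (by simpa using hk : ¬ (k == q.1) = true)]
    · -- fresh key: appended at the end
      have hc' : (dictOf t).contains q.1 = false := by simpa using hc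
      have hnm : q.1 ∉ firstKeys t := by
        rw [← hkeys]; intro hm; exact hc ((PySem.Dict.contains_iff_mem_keys _ _).mpr hm)
      have hnm' : q.1 ∉ t.map Prod.fst := by
        intro hm; exact hnm (by simpa [firstKeys] using (mem_fkFold (ks := [])).mpr (Or.inr hm))
      rw [hfold, PySem.Dict.items_insert_of_not_contains _ _ hc',
        PySem.Dict.getD_of_not_contains _ _ hc', ih, hfk, fkStep, if_neg hnm, List.map_append]
      congr 1
      · apply List.map_congr_left
        intro k hk
        have : k ≠ q.1 := fun he => hnm (he ▸ hk)
        simp [sumFor_append, Ne.symm this]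
      · simp [sumFor, filter_eq_nil_of_not_mem hnm']

-- B's collected key list is the first-occurrence key list of the flattened pairs.
theorem collectKeysB_eq (d : List (String × List (String × Int))) :
    collectKeysB d = firstKeys (d.flatMap (fun p => p.2)) := by
  unfold collectKeysB firstKeys
  rw [List.foldl_flatMap]
  rfl

-- With duplicate-free inner keys, inner.get(k, 0) is the sum of that inner list's values at k.
theorem getB_eq_sumFor {l : List (String × Int)} (hnd : (l.map Prod.fst).Nodup) (k : String) :
    getB l k = sumFor k l := by
  induction l with
  | nil => simp [getB, sumFor]
  | cons q t ih =>
    simp only [List.map_cons, List.nodup_cons] at hnd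
    by_cases h : q.1 = k
    · have : k ∉ t.map Prod.fst := h ▸ hnd.1
      simp [getB, sumFor, h, filter_eq_nil_of_not_mem this]
    · simp only [getB, beq_iff_eq, if_neg h, sumFor, List.filter_cons]
      exact ih hnd.2

-- Summing inner.get(k, 0) over all inner dicts equals the flattened per-key total.
theorem bval_eq_sumFor {d : List (String × List (String × Int))}
    (hin : ∀ p ∈ d, (p.2.map Prod.fst).Nodup) (k : String) :
    (d.map (fun p => getB p.2 k)).sum = sumFor k (d.flatMap (fun p => p.2)) := by
  induction d with
  | nil => simp [sumFor]
  | cons p t ih =>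
    simp only [List.map_cons, List.sum_cons, List.flatMap_cons]
    rw [getB_eq_sumFor (hin p (List.mem_cons_self)) k,
      ih (fun p hp => hin p (List.mem_cons_of_mem _ hp))]
    simp [sumFor, List.filter_append]

-- A's two-way branch is one unconditional get-add-insert.
theorem branch_eq (r : PySem.Dict String Int) (k : String) (v : Int) :
    (if r.contains k then r.insert k (r.getD k 0 + v) else r.insert k v)
      = r.insert k (r.getD k 0 + v) := by
  by_cases h : r.contains k
  · simp [h]
  · have h' : r.contains k = false := by simpa using h
    rw [if_neg (by simp [h']), PySem.Dict.getD_of_not_contains r 0 h', zero_add]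

-- With distinct outer keys, indexing d by the key of one of its own pairs returns that pair's value.
theorem lookupOuterA_eq {d : List (String × List (String × Int))}
    (hnd : (d.map Prod.fst).Nodup) {p : String × List (String × Int)} (hp : p ∈ d) :
    lookupOuterA d p.1 = p.2 := by
  induction d with
  | nil => cases hp
  | cons h t ih =>
    obtain ⟨a, b⟩ := h
    simp only [List.map_cons, List.nodup_cons] at hnd
    rcases List.mem_cons.mp hp with rfl | hmem
    · simp [lookupOuterA]
    · have hne : a ≠ p.1 := by
        intro he; exact hnd.1 (he ▸ List.mem_map_of_mem hmem)
      simp only [lookupOuterA, beq_iff_eq, if_neg hne]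
      exact ih hnd.2 hmem

theorem lookupInnerA_eq {l : List (String × Int)}
    (hnd : (l.map Prod.fst).Nodup) {q : String × Int} (hq : q ∈ l) :
    lookupInnerA l q.1 = q.2 := by
  induction l with
  | nil => cases hq
  | cons h t ih =>
    obtain ⟨a, b⟩ := h
    simp only [List.map_cons, List.nodup_cons] at hnd
    rcases List.mem_cons.mp hq with rfl | hmem
    · simp [lookupInnerA]
    · have hne : a ≠ q.1 := by
        intro he; exact hnd.1 (he ▸ List.mem_map_of_mem hmem)
      simp only [lookupInnerA, beq_iff_eq, if_neg hne]
      exact ih hnd.2 hmem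

-- Rewriting an if-insert map that hits no key of l leaves l unchanged.
theorem map_if_no_key (l : List (String × Int)) (k : String) (w : Int)
    (hk : k ∉ l.map Prod.fst) :
    l.map (fun p => if (p.1 == k) = true then (k, w) else p) = l := by
  induction l with
  | nil => rfl
  | cons h t ih =>
    have hk1 : k ≠ h.1 ∧ k ∉ t.map Prod.fst := by simpa using hk
    simp only [List.map_cons]
    rw [if_neg (by simpa using Ne.symm hk1.1), ih hk1.2]

-- Summing the second components after replacing the unique entry at key k by (k, w + v) adds v.
theorem sum_map_replace (l : List (String × Int)) (k : String) (w v : Int)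
    (hnd : (l.map Prod.fst).Nodup) (hmem : (k, w) ∈ l) :
    ((l.map (fun p => if (p.1 == k) = true then (k, w + v) else p)).map Prod.snd).sum
      = (l.map Prod.snd).sum + v := by
  induction l with
  | nil => cases hmem
  | cons h t ih =>
    simp only [List.map_cons, List.nodup_cons] at hnd
    rcases List.mem_cons.mp hmem with rfl | hmem
    · simp only [List.map_cons, beq_self_eq_true]
      rw [map_if_no_key t k (w + v) hnd.1]
      simp [List.sum_cons]; ring
    · have hne : h.1 ≠ k := by
        intro he; exact hnd.1 (he ▸ List.mem_map_of_mem (by simpa using hmem))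
      simp only [List.map_cons, List.sum_cons]
      rw [if_neg (by simpa using hne), ih hnd.2 hmem]
      ring

-- One get-add-insert step raises the sum of the dict's values by exactly v.
theorem values_sum_insert (r : PySem.Dict String Int) (hnd : r.keys.Nodup)
    (k : String) (v : Int) :
    ((r.insert k (r.getD k 0 + v)).values).sum = r.values.sum + v := by
  by_cases h : r.contains k
  · obtain ⟨w, hw⟩ : ∃ w, (k, w) ∈ r.items := by
      have hk : k ∈ r.keys := (PySem.Dict.contains_iff_mem_keys r k).mp h
      have : k ∈ r.items.map Prod.fst := by simpa [PySem.Dict.keys] using hk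
      obtain ⟨p, hp, he⟩ := List.mem_map.mp this
      exact ⟨p.2, by simpa [← he] using hp⟩
    have hget : r.getD k 0 = w := PySem.Dict.getD_of_mem_items r hw hnd 0
    have hitems := PySem.Dict.items_insert_of_contains r (r.getD k 0 + v) h
    have hndk : (r.items.map Prod.fst).Nodup := by simpa [PySem.Dict.keys] using hnd
    calc ((r.insert k (r.getD k 0 + v)).values).sum
        = (((r.items.map (fun p => if (p.1 == k) = true then (k, r.getD k 0 + v) else p))).map Prod.snd).sum := by
          simp [PySem.Dict.values, hitems]
      _ = (r.items.map Prod.snd).sum + v := by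
          rw [hget]; exact sum_map_replace r.items k w v hndk hw
      _ = r.values.sum + v := by simp [PySem.Dict.values]
  · have h' : r.contains k = false := by simpa using h
    rw [PySem.Dict.getD_of_not_contains r 0 h']
    simp [PySem.Dict.values, PySem.Dict.items_insert_of_not_contains r _ h']

-- Invariant of the get-add-insert loop: the values of the result sum to the values consumed.
theorem loop_sum (pairs : List (String × Int)) (r : PySem.Dict String Int)
    (hnd : r.keys.Nodup) :
    ((pairs.foldl (fun (r : PySem.Dict String Int) q => r.insert q.1 (r.getD q.1 0 + q.2)) r).values).sum
      = r.values.sum + (pairs.map Prod.snd).sum := by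
  induction pairs generalizing r with
  | nil => simp
  | cons q t ih =>
    simp only [List.foldl_cons, List.map_cons, List.sum_cons]
    rw [ih _ (PySem.Dict.nodup_keys_insert r q.1 _ hnd),
      values_sum_insert r hnd q.1 q.2]
    ring

-- ===== VERDICT (by name: the statement is the Claim_ definition above) =====
theorem analyzeCounts_spec : Claim_equal_analyzeCounts := by
  intro d _ hpre
  obtain ⟨hout, hin⟩ := hpre
  unfold Spec_analyzeCounts analyzeCounts analyzeCounts_alt
  -- A's loop with the lookups resolved and the branch merged is the flattened get-add-insert fold
  have hcong : d.foldl (fun (st : PySem.Dict String Int × Int) p =>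
      (lookupOuterA d p.1).foldl (fun st q =>
        let v := lookupInnerA (lookupOuterA d p.1) q.1
        ((if st.1.contains q.1 then st.1.insert q.1 (st.1.getD q.1 0 + v)
          else st.1.insert q.1 v), st.2 + v)) st) ((PySem.Dict.empty : PySem.Dict String Int), (0 : Int))
      = d.foldl (fun (st : PySem.Dict String Int × Int) p =>
          p.2.foldl (fun st q => (st.1.insert q.1 (st.1.getD q.1 0 + q.2), st.2 + q.2)) st)
        ((PySem.Dict.empty : PySem.Dict String Int), (0 : Int)) := by
    apply PySem.List.foldl_congr_mem
    intro st p hp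
    rw [lookupOuterA_eq hout hp]
    apply PySem.List.foldl_congr_mem
    intro st q hq
    simp only [lookupInnerA_eq (hin p hp) hq, branch_eq]
  rw [hcong, ← List.foldl_flatMap,
    PySem.List.foldl_prod_mk
      (fun (r : PySem.Dict String Int) (q : String × Int) => r.insert q.1 (r.getD q.1 0 + q.2))
      (fun (t : Int) (q : String × Int) => t + q.2) (d.flatMap (·.2)) PySem.Dict.empty 0]
  have hitems : ((d.flatMap fun p => p.2).foldl
      (fun (r : PySem.Dict String Int) q => r.insert q.1 (r.getD q.1 0 + q.2)) PySem.Dict.empty).items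
      = (collectKeysB d).map (fun k => (k, (d.map (fun p => getB p.2 k)).sum)) := by
    rw [show ((d.flatMap fun p => p.2).foldl
        (fun (r : PySem.Dict String Int) q => r.insert q.1 (r.getD q.1 0 + q.2)) PySem.Dict.empty)
        = dictOf (d.flatMap fun p => p.2) from rfl,
      dictOf_items, collectKeysB_eq]
    exact (List.map_congr_left fun k _ => by rw [bval_eq_sumFor hin k]).symm
  refine Prod.ext hitems ?_
  -- totals: A co-accumulates the flattened values; B sums the finished result's values
  simp only
  rw [PySem.List.foldl_add (d.flatMap (·.2)) Prod.snd 0]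
  have : ((collectKeysB d).map (fun k => (k, (d.map (fun p => getB p.2 k)).sum))).map Prod.snd
      = (dictOf (d.flatMap fun p => p.2)).values := by
    rw [PySem.Dict.values, dictOf_items, collectKeysB_eq]
    exact congrArg (List.map Prod.snd)
      (List.map_congr_left fun k _ => by rw [bval_eq_sumFor hin k])
  rw [this, dictOf,
    loop_sum (d.flatMap (·.2)) PySem.Dict.empty (by simp [PySem.Dict.keys, PySem.Dict.empty])]
  simp [PySem.Dict.values, PySem.Dict.empty]
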